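-- pv_equiv track=rewrite | github.com/Qianyue-Wang1/NAACL-25-DOME-story-generation | pipline/MEM.py | group_by_s2
-- ===== SOURCE A (Python) =====
-- def group_by_s2(nei_timeinfo):
--     #(en,r,-,-)
--     grouped_tuples = {}
--     for tpl in nei_timeinfo:
--         key = tuple(tpl[:2])
--         if key not in grouped_tuples:
--             grouped_tuples[key] = []
--         grouped_tuples[key].append(tpl)
--     res=list(grouped_tuples.values())
--     ress=[]
--     keep_triple=[]
--     for i in res:
--         if len(i)==1:
--              keep_triple.append(i[0])
--         else:
--              ress.append(i)
--
--
--     return ress,keep_triple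
-- ===== SOURCE B (Python) =====
-- def group_by_s2(nei_timeinfo):
--     # count-first strategy: one counting pass over keys, then one classifying pass
--     counts = {}
--     for tpl in nei_timeinfo:
--         key = tuple(tpl[:2])
--         counts[key] = counts.get(key, 0) + 1
--     multi = {}
--     keep_triple = []
--     for tpl in nei_timeinfo:
--         key = tuple(tpl[:2])
--         if counts.get(key, 0) == 1:
--             keep_triple.append(tpl)
--         else:
--             multi.setdefault(key, []).append(tpl)
--     return list(multi.values()), keep_triple
-- ===== Notes on version B (the rewrite author's own statement) =====
-- stated objective: alternative
-- what changed: Replaces 'build all groups in a dict, then classify each group by its length' with a count-first strategy: a frequency pass over the keys, then a single classifying pass that routes each tuple directly to keep_triple (count 1) or to its multi group.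
import Mathlib
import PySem

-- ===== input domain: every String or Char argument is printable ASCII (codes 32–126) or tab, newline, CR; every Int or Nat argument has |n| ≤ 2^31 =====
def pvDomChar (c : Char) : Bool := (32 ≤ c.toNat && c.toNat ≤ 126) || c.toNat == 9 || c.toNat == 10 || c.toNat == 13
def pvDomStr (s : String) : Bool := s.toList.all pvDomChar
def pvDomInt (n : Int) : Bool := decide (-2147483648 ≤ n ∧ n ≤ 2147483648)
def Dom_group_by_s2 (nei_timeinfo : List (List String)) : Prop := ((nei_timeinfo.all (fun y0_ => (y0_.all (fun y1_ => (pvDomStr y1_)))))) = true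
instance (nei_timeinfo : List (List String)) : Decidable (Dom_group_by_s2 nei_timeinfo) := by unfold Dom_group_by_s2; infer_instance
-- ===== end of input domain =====

-- B replaces "build every group, then classify groups by length" with "count keys first,
-- then classify each tuple in one pass" — an alternative decomposition, same cost.

-- ===== PORT A =====
-- literal port of A: group into an insertion-ordered dict keyed by tpl[:2], then split
-- the group lists by length (i[0] is ported as headI: every group is nonempty by construction).
def group_by_s2 (nei_timeinfo : List (List String)) : List (List (List String)) × List (List String) :=
  let grouped : PySem.Dict (List String) (List (List String)) :=
    nei_timeinfo.foldl (fun d tpl =>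
      let key := PySem.List.slice tpl (some 0) (some 2)
      let d := if d.contains key then d else d.insert key []
      d.modify key [] (fun g => g ++ [tpl])) PySem.Dict.empty
  let res := grouped.values
  let rk := res.foldl (fun acc i =>
      if i.length == 1 then (acc.1, acc.2 ++ [i.headI])
      else (acc.1 ++ [i], acc.2)) (([], []) : List (List (List String)) × List (List String))
  (rk.1, rk.2)

-- ===== PORT B =====
-- literal port of Source B: a counting pass, then one classifying pass over the input.
def group_by_s2_alt (nei_timeinfo : List (List String)) : List (List (List String)) × List (List String) :=
  let counts : PySem.Dict (List String) Int :=
    nei_timeinfo.foldl (fun d tpl =>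
      let key := PySem.List.slice tpl (some 0) (some 2)
      d.insert key (d.getD key 0 + 1)) PySem.Dict.empty
  let mk := nei_timeinfo.foldl (fun acc tpl =>
      let key := PySem.List.slice tpl (some 0) (some 2)
      if counts.getD key 0 == 1 then (acc.1, acc.2 ++ [tpl])
      else ((acc.1.setdefault key []).modify key [] (fun g => g ++ [tpl]), acc.2))
    ((PySem.Dict.empty, []) : PySem.Dict (List String) (List (List String)) × List (List String))
  (mk.1.values, mk.2)

-- ===== PRECONDITION & SPEC =====
def Spec_group_by_s2 (nei_timeinfo : List (List String)) (out : List (List (List String)) × List (List String)) : Prop := out = group_by_s2_alt nei_timeinfo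
instance (nei_timeinfo : List (List String)) (out : List (List (List String)) × List (List String)) : Decidable (Spec_group_by_s2 nei_timeinfo out) := by unfold Spec_group_by_s2; infer_instance

-- ===== CLAIM (what is proved, stated in full; the proofs are below) =====
def Claim_equal_group_by_s2 : Prop := ∀ (nei_timeinfo : List (List String)), Dom_group_by_s2 nei_timeinfo → Spec_group_by_s2 nei_timeinfo (group_by_s2 nei_timeinfo)

-- ===== LEMMAS AND PROOFS =====

-- tpl[:2], the shared grouping key
def pvKey (t : List String) : List String := PySem.List.slice t (some 0) (some 2)

-- the common grouping fold both programs reduce to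
def pvGroup (l : List (List String)) : PySem.Dict (List String) (List (List String)) :=
  l.foldl (fun d t => d.modify (pvKey t) [] (fun g => g ++ [t])) PySem.Dict.empty

-- A's "if key not in d: d[key] = []; d[key].append(tpl)" is one modify
lemma stepA_eq (d : PySem.Dict (List String) (List (List String))) (k : List String) (tpl : List String) :
    (if d.contains k then d else d.insert k []).modify k [] (fun g => g ++ [tpl])
      = d.modify k [] (fun g => g ++ [tpl]) := by
  by_cases h : d.contains k = true
  · simp [h]
  · have hc : d.contains k = false := by simpa using h
    simp [hc, PySem.Dict.modify, PySem.Dict.getD_insert_self, PySem.Dict.insert_insert_self,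
      PySem.Dict.getD_of_not_contains]

-- B's "d.setdefault(key, []).append(tpl)" is the same modify
lemma stepB_eq (d : PySem.Dict (List String) (List (List String))) (k : List String) (tpl : List String) :
    (d.setdefault k []).modify k [] (fun g => g ++ [tpl]) = d.modify k [] (fun g => g ++ [tpl]) := by
  by_cases h : d.contains k = true
  · simp [PySem.Dict.setdefault_of_contains, h]
  · have hc : d.contains k = false := by simpa using h
    simp [PySem.Dict.setdefault_of_not_contains, hc, PySem.Dict.modify,
      PySem.Dict.getD_insert_self, PySem.Dict.insert_insert_self, PySem.Dict.getD_of_not_contains]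

lemma slice_eq_pvKey (t : List String) : PySem.List.slice t (some 0) (some 2) = pvKey t := rfl

lemma pvGroup_def (l : List (List String)) :
    l.foldl (fun d t => d.modify (pvKey t) [] (fun g => g ++ [t])) PySem.Dict.empty = pvGroup l := rfl

lemma pvGroup_getD (l : List (List String)) (k : List String) :
    (pvGroup l).getD k [] = l.filter (fun t => pvKey t == k) := by
  have h : pvGroup l
      = (l.map (fun t => (pvKey t, t))).foldl
          (fun d p => d.modify p.1 [] (fun g => g ++ [p.2])) PySem.Dict.empty := by
    rw [List.foldl_map]
    rfl
  rw [h, PySem.Dict.getD_foldl_modify_append]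
  simp [PySem.Dict.getD_empty, List.filter_map, List.map_map, Function.comp_def]

lemma pvGroup_keys (l : List (List String)) :
    (pvGroup l).keys = PySem.Set.ofList (l.map pvKey) := by
  unfold pvGroup
  rw [PySem.Dict.keys_foldl_modify_key]
  simp [PySem.Dict.keys_empty, PySem.Set.update_nil_left]

lemma pvGroup_keys_nodup (l : List (List String)) : (pvGroup l).keys.Nodup := by
  unfold pvGroup
  exact PySem.Dict.nodup_keys_foldl_modify_key _ _ _ _ _ PySem.Dict.nodup_keys_empty

lemma pvGroup_values (l : List (List String)) :
    (pvGroup l).values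
      = (PySem.Set.ofList (l.map pvKey)).map (fun k => l.filter (fun t => pvKey t == k)) := by
  rw [PySem.Dict.values_eq_map_keys _ (pvGroup_keys_nodup l) [], pvGroup_keys]
  exact List.map_congr_left fun k _ => pvGroup_getD l k

lemma filter_length_count (l : List (List String)) (k : List String) :
    (l.filter (fun t => pvKey t == k)).length = (l.map pvKey).count k := by
  have h1 : (l.map pvKey).count k = ((l.map pvKey).filter (fun x => x == k)).length := by
    simp [List.count, List.countP_eq_length_filter]
  rw [h1, List.filter_map]
  simp [Function.comp_def]

lemma classA (res : List (List (List String))) :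
    ∀ (r : List (List (List String))) (kp : List (List String)),
    res.foldl (fun acc i =>
        if i.length == 1 then (acc.1, acc.2 ++ [i.headI]) else (acc.1 ++ [i], acc.2)) (r, kp)
      = (r ++ res.filter (fun i => !(i.length == 1)),
         kp ++ (res.filter (fun i => i.length == 1)).map List.headI) := by
  induction res with
  | nil => intro r kp; simp
  | cons i res ih =>
    intro r kp
    by_cases h : (i.length == 1) = true
    · simp only [List.foldl_cons, h, if_true]
      rw [ih]
      simp [h, List.append_assoc]
    · have h' : (i.length == 1) = false := by simpa using h
      simp only [List.foldl_cons, h', Bool.false_eq_true, if_false]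
      rw [ih]
      simp [h', List.append_assoc]

lemma classB (cond : List String → Bool) (l : List (List String)) :
    ∀ (m : PySem.Dict (List String) (List (List String))) (kp : List (List String)),
    l.foldl (fun acc t =>
        if cond t then (acc.1, acc.2 ++ [t])
        else ((acc.1.setdefault (pvKey t) []).modify (pvKey t) [] (fun g => g ++ [t]), acc.2)) (m, kp)
      = ((l.filter (fun t => !cond t)).foldl
            (fun d t => d.modify (pvKey t) [] (fun g => g ++ [t])) m,
         kp ++ l.filter cond) := by
  induction l with
  | nil => intro m kp; simp
  | cons t l ih =>
    intro m kp
    by_cases h : cond t = true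
    · simp only [List.foldl_cons, h, if_true]
      rw [ih]
      simp [h, List.append_assoc]
    · simp only [List.foldl_cons, h, Bool.false_eq_true, if_false]
      rw [stepB_eq, ih]
      simp [h]

lemma counts_getD (l : List (List String)) (k : List String) :
    (l.foldl (fun d tpl => d.insert (pvKey tpl) (d.getD (pvKey tpl) 0 + 1))
        (PySem.Dict.empty : PySem.Dict (List String) Int)).getD k 0
      = ((l.map pvKey).count k : Int) := by
  have h : l.foldl (fun d tpl => d.insert (pvKey tpl) (d.getD (pvKey tpl) 0 + 1))
        (PySem.Dict.empty : PySem.Dict (List String) Int)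
      = (l.map pvKey).foldl (fun d x => d.insert x (d.getD x 0 + 1)) PySem.Dict.empty := by
    rw [List.foldl_map]
  rw [h, PySem.Dict.getD_foldl_insert_add_one]
  simp [PySem.Dict.getD_empty]

lemma cast_beq_one (n : ℕ) : (((n : Int)) == (1 : Int)) = (n == 1) := by
  rcases eq_or_ne n 1 with h | h
  · simp [h]
  · have h2 : (n : Int) ≠ 1 := by exact_mod_cast h
    simp [h, h2]

lemma ofList_filter (p : List String → Bool) (l : List (List String)) :
    PySem.Set.ofList (l.filter p) = (PySem.Set.ofList l).filter p := by
  induction l with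
  | nil => rfl
  | cons a l ih =>
    rw [List.filter_cons]
    by_cases h : p a = true
    · simp only [h, if_true]
      rw [PySem.Set.ofList_cons, PySem.Set.ofList_cons, ih]
      simp only [PySem.Set.discard, List.filter_cons, h, if_true, List.filter_filter]
      congr 1
      apply List.filter_congr
      intro x _
      exact Bool.and_comm _ _
    · simp only [h, Bool.false_eq_true, if_false]
      rw [PySem.Set.ofList_cons, ih]
      simp only [PySem.Set.discard, List.filter_cons, h, Bool.false_eq_true, if_false,
        List.filter_filter]
      apply List.filter_congr
      intro x _
      by_cases hx : x = a
      · simp [hx, h]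
      · simp [hx]

lemma singleton_map_headI (f : List String → List String) (q : List String → Bool) :
    ∀ (l : List (List String)) (g : List String → List String),
    (∀ k ∈ l.map f, q k = true → (l.map f).count k = 1) →
    (∀ k ∈ l.map f, q k = true → g k = (l.filter (fun t => f t == k)).headI) →
    ((PySem.Set.ofList (l.map f)).filter q).map g = l.filter (fun t => q (f t)) := by
  intro l
  induction l with
  | nil => intro g _ _; simp
  | cons a l ih =>
    intro g hq hg
    rw [List.map_cons, PySem.Set.ofList_cons]
    by_cases hqa : q (f a) = true
    · have hcount : ((f a :: l.map f).count (f a)) = 1 := hq (f a) (by simp) hqa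
      have hnot : f a ∉ l.map f := by
        intro hmem
        have hpos : 0 < (l.map f).count (f a) := List.count_pos_iff.mpr hmem
        rw [List.count_cons_self] at hcount
        omega
      have hdisc : PySem.Set.discard (PySem.Set.ofList (l.map f)) (f a)
          = PySem.Set.ofList (l.map f) := by
        simp only [PySem.Set.discard]
        apply List.filter_eq_self.mpr
        intro x hx
        have hxm : x ∈ l.map f := (PySem.Set.mem_ofList _ _).mp hx
        have : x ≠ f a := fun he => hnot (he ▸ hxm)
        simp [this]
      have hga : g (f a) = a := by
        rw [hg (f a) (by simp) hqa]
        simp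
      have hq' : ∀ k ∈ l.map f, q k = true → (l.map f).count k = 1 := by
        intro k hk hqk
        have hfull := hq k (by simp [hk]) hqk
        have hne : k ≠ f a := fun he => hnot (he ▸ hk)
        simp only [List.map_cons, List.count_cons] at hfull
        simpa [hne, Ne.symm hne] using hfull
      have hg' : ∀ k ∈ l.map f, q k = true → g k = (l.filter (fun t => f t == k)).headI := by
        intro k hk hqk
        have hne : k ≠ f a := fun he => hnot (he ▸ hk)
        have hkne : (f a == k) = false := by simpa using Ne.symm hne
        rw [hg k (by simp [hk]) hqk]
        simp [hkne]
      simp only [List.filter_cons, hqa, if_true, hdisc, List.map_cons, hga]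
      rw [ih g hq' hg']
    · have hq' : ∀ k ∈ l.map f, q k = true → (l.map f).count k = 1 := by
        intro k hk hqk
        have hne : k ≠ f a := fun he => hqa (he ▸ hqk)
        have hfull := hq k (by simp [hk]) hqk
        simp only [List.map_cons, List.count_cons] at hfull
        simpa [hne, Ne.symm hne] using hfull
      have hg' : ∀ k ∈ l.map f, q k = true → g k = (l.filter (fun t => f t == k)).headI := by
        intro k hk hqk
        have hne : k ≠ f a := fun he => hqa (he ▸ hqk)
        have hkne : (f a == k) = false := by simpa using Ne.symm hne
        rw [hg k (by simp [hk]) hqk]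
        simp [hkne]
      have hstep : (PySem.Set.discard (PySem.Set.ofList (l.map f)) (f a)).filter q
          = (PySem.Set.ofList (l.map f)).filter q := by
        simp only [PySem.Set.discard, List.filter_filter]
        apply List.filter_congr
        intro x _
        by_cases hx : x = f a
        · simp [hx, hqa]
        · simp [hx]
      simp only [List.filter_cons, hqa, Bool.false_eq_true, if_false]
      rw [hstep, ih g hq' hg']

lemma A_fold_eq (nei : List (List String)) :
    nei.foldl (fun d tpl =>
      (if d.contains (pvKey tpl) then d else d.insert (pvKey tpl) []).modify
        (pvKey tpl) [] (fun g => g ++ [tpl])) PySem.Dict.empty = pvGroup nei := by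
  unfold pvGroup
  congr 1
  funext d t
  exact stepA_eq d (pvKey t) t

lemma map_filter_key (p : List String → Bool) (l : List (List String)) :
    (l.filter (fun t => p (pvKey t))).map pvKey = (l.map pvKey).filter p := by
  induction l with
  | nil => rfl
  | cons a l ih => by_cases h : p (pvKey a) = true <;> simp [h, ih]

-- ===== VERDICT (by name: the statement is the Claim_ definition above) =====
theorem group_by_s2_spec : Claim_equal_group_by_s2 := by
  intro nei _
  unfold Spec_group_by_s2
  simp only [group_by_s2, group_by_s2_alt, slice_eq_pvKey]
  rw [A_fold_eq]
  simp only [counts_getD, cast_beq_one, classA, classB, pvGroup_def, pvGroup_values,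
    List.nil_append]
  simp only [Prod.mk.injEq]
  refine ⟨?_, ?_⟩
  · rw [List.filter_map]
    simp only [Function.comp_def, filter_length_count]
    rw [map_filter_key (fun k => !((nei.map pvKey).count k == 1)) nei, ofList_filter]
    apply List.map_congr_left
    intro k hk
    have hkq : (!((nei.map pvKey).count k == 1)) = true := (List.mem_filter.mp hk).2
    rw [List.filter_filter]
    symm
    apply List.filter_congr
    intro t _
    by_cases ht : pvKey t = k
    · simp [ht, hkq]
    · simp [ht]
  · rw [List.filter_map]
    simp only [Function.comp_def, filter_length_count, List.map_map]
    refine singleton_map_headI pvKey (fun k => ((nei.map pvKey).count k == 1)) nei _ ?_ ?_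
    · intro k _ h
      simpa using h
    · intro k _ _
      rfl
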